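-- pv_equiv track=rewrite | github.com/k0518ishore-tech/ITT-2026 | Python/GuessTheCode.py | nearhit
-- ===== SOURCE A (Python) =====
-- def nearhit(code,guess):
--    c=0
--    for i in range(len(code)):
--       if guess[i] in code:
--          if guess[i]!=code[i]:
--             c=c+1
--       else:
--          continue
--    return c
-- ===== SOURCE B (Python) =====
-- def nearhit(code, guess):
--     prefix = guess[:len(code)]
--     total = sum(prefix.count(ch) for ch in set(code))
--     exact = sum(1 for a, b in zip(code, prefix) if a == b)
--     return total - exact
-- ===== Notes on version B (the rewrite author's own statement) =====
-- stated objective: alternative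
-- what changed: Replaces A's per-index loop (membership test then mismatch test at each position) by character aggregation: sum, over the distinct characters of code, of their occurrence counts in the guess prefix, minus the exact matches counted over zip(code, prefix).
import Mathlib
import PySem

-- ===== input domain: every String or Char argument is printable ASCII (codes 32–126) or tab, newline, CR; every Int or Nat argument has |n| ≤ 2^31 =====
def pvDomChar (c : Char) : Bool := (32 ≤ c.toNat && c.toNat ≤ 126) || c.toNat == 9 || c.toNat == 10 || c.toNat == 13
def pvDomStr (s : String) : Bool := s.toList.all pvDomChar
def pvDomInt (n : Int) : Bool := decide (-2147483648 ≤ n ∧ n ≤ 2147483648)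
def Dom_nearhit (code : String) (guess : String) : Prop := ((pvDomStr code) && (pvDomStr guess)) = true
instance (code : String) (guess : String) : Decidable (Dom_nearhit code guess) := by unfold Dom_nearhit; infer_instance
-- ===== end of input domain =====

-- B replaces the per-index membership loop by character aggregation: sum of per-distinct-code-char
-- occurrence counts in the guess prefix, minus exact matches over the zipped pair (same cost).

-- ===== PORT A =====
def nearhit (code : String) (guess : String) : Int :=
  let cs := code.toList
  let gs := guess.toList
  (PySem.List.pyRange 0 cs.length 1).foldl (fun c i =>
    let g := (PySem.List.pyGet? gs i).getD ' '
    if cs.contains g then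
      (if g ≠ (PySem.List.pyGet? cs i).getD ' ' then c + 1 else c)
    else c) 0

-- ===== PORT B =====
def nearhit_alt (code : String) (guess : String) : Int :=
  let cs := code.toList
  let gs := guess.toList
  let pre := PySem.List.slice gs none (some (cs.length : Int))   -- guess[:len(code)]
  let total : Int := ((PySem.Set.ofList cs).map (fun ch => (pre.count ch : Int))).sum
  let exact : Int := ((cs.zip pre).countP (fun p => p.1 == p.2) : Int)
  total - exact

-- ===== PRECONDITION & SPEC =====
-- Pre_ excludes only inputs where A raises IndexError (guess shorter than code); B returns there.
def Pre_nearhit (code : String) (guess : String) : Prop :=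
  code.toList.length ≤ guess.toList.length
instance (code : String) (guess : String) : Decidable (Pre_nearhit code guess) := by
  unfold Pre_nearhit; infer_instance
def pvWitness_nearhit : String × String := ("abc", "cab")

def Spec_nearhit (code : String) (guess : String) (out : Int) : Prop := out = nearhit_alt code guess
instance (code : String) (guess : String) (out : Int) : Decidable (Spec_nearhit code guess out) := by unfold Spec_nearhit; infer_instance

-- ===== CLAIM =====
def Claim_equal_nearhit : Prop := ∀ (code : String) (guess : String), Dom_nearhit code guess → Pre_nearhit code guess → Spec_nearhit code guess (nearhit code guess)
-- ===== LEMMAS AND PROOFS =====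

-- A's fold splits: over any index list where "equal implies present", the fold equals
-- acc + (#present) - (#equal).
theorem nearhit_fold_split (pin peq : Int → Bool)
    (L : List Int) (h : ∀ i ∈ L, peq i = true → pin i = true) :
    ∀ acc : Int,
      L.foldl (fun c i => if pin i then (if ¬ (peq i = true) then c + 1 else c) else c) acc
        = acc + ((L.filter pin).length : Int) - ((L.filter peq).length : Int) := by
  induction L with
  | nil => intro acc; simp
  | cons x xs ih =>
    intro acc
    have hx := h x (by simp)
    have ih' := ih (fun i hi => h i (by simp [hi]))
    rw [List.foldl_cons]
    by_cases hpin : pin x = true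
    · by_cases hpeq : peq x = true
      · simp only [hpin, hpeq, not_true, if_true, if_false]
        rw [ih', List.filter_cons_of_pos hpin, List.filter_cons_of_pos hpeq]
        simp only [List.length_cons]
        push_cast; ring
      · simp only [hpin, if_true, if_pos hpeq]
        rw [ih', List.filter_cons_of_pos hpin, List.filter_cons_of_neg (by simp [hpeq])]
        simp only [List.length_cons]
        push_cast; ring
    · have hpeq : peq x = false := by
        by_contra hc
        exact hpin (hx (by simpa using hc))
      simp only [if_neg hpin]
      rw [ih', List.filter_cons_of_neg (by simp [hpin]), List.filter_cons_of_neg (by simp [hpeq])]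

-- Filtering indices 0..n-1 by a property of gs[k] is filtering the prefix gs.take n.
theorem filter_range_getD (P : Char → Bool) :
    ∀ (n : Nat) (gs : List Char), n ≤ gs.length →
      ((List.range n).filter (fun k => P (gs.getD k ' '))).length
        = ((gs.take n).filter P).length := by
  intro n
  induction n with
  | zero => intro gs _; simp
  | succ m ih =>
    intro gs hle
    cases gs with
    | nil => simp at hle
    | cons g gs' =>
      have hm : m ≤ gs'.length := by simpa using hle
      have hcomp : ((fun k => P ((g :: gs').getD k ' ')) ∘ Nat.succ)
          = (fun k => P (gs'.getD k ' ')) := by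
        funext k; simp
      rw [List.range_succ_eq_map, List.filter_cons]
      simp only [List.filter_map, hcomp, List.getD_cons_zero]
      rw [List.take_succ_cons, List.filter_cons]
      by_cases hP : P g = true
      · rw [if_pos hP, if_pos hP]
        simp only [List.length_cons, List.length_map]
        rw [ih gs' hm]
      · rw [if_neg hP, if_neg hP, List.length_map, ih gs' hm]

-- Filtering indices by gs[k] == cs[k] counts the equal pairs of the zip.
theorem filter_range_eq_zip :
    ∀ (cs gs : List Char), cs.length ≤ gs.length →
      ((List.range cs.length).filter
          (fun k => gs.getD k ' ' == cs.getD k ' ')).length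
        = (cs.zip gs).countP (fun p => p.1 == p.2) := by
  intro cs
  induction cs with
  | nil => intro gs _; simp
  | cons c cs' ih =>
    intro gs hle
    cases gs with
    | nil => simp at hle
    | cons g gs' =>
      have hm : cs'.length ≤ gs'.length := by simpa using hle
      have hcomp : ((fun k => (g :: gs').getD k ' ' == (c :: cs').getD k ' ') ∘ Nat.succ)
          = (fun k => gs'.getD k ' ' == cs'.getD k ' ') := by
        funext k; simp
      have hsymm : (c == g) = (g == c) := by
        by_cases hgc : g = c
        · subst hgc; rfl
        · have h1 : (g == c) = false := by simpa using hgc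
          have h2 : (c == g) = false := by
            simpa using fun h : c = g => hgc h.symm
          rw [h1, h2]
      rw [List.length_cons, List.range_succ_eq_map, List.filter_cons]
      simp only [List.filter_map, hcomp, List.getD_cons_zero]
      rw [List.zip_cons_cons, List.countP_cons]
      simp only [hsymm]
      by_cases h : (g == c) = true
      · rw [if_pos h, if_pos h]
        simp only [List.length_cons, List.length_map]
        rw [ih gs' hm]
      · rw [if_neg h, if_neg h, List.length_map, ih gs' hm, Nat.add_zero]

theorem indic_sum (S : List Char) (hS : S.Nodup) (x : Char) :
    (S.map (fun ch => (if x = ch then (1:Int) else 0))).sum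
      = (if x ∈ S then (1:Int) else 0) := by
  induction S with
  | nil => simp
  | cons a S' ihS =>
    have hnd := List.nodup_cons.mp hS
    by_cases hxa : x = a
    · subst hxa
      simp [List.mem_cons, hnd.1, ihS hnd.2]
    · simp [List.mem_cons, hxa, ihS hnd.2]

theorem filter_mem_eq_sum_counts (cs : List Char) :
    ∀ l : List Char,
      ((l.filter (fun x => cs.contains x)).length : Int)
        = ((PySem.Set.ofList cs).map (fun ch => (l.count ch : Int))).sum := by
  intro l
  induction l with
  | nil => simp
  | cons x l' ihl =>
    have hsplit : ((PySem.Set.ofList cs).map (fun ch => ((x :: l').count ch : Int))).sum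
        = ((PySem.Set.ofList cs).map (fun ch => (l'.count ch : Int))).sum
          + ((PySem.Set.ofList cs).map (fun ch => (if x = ch then (1:Int) else 0))).sum := by
      rw [← List.sum_map_add]
      apply congrArg List.sum
      apply List.map_congr_left
      intro ch _
      by_cases hx : x = ch
      · subst hx
        simp [List.count_cons_self]
      · have hxb : (x == ch) = false := by simpa using hx
        simp [hx]
    rw [hsplit, indic_sum (PySem.Set.ofList cs) (PySem.Set.nodup_ofList cs) x]
    by_cases hmem : x ∈ cs
    · have hmemS : x ∈ PySem.Set.ofList cs := (PySem.Set.mem_ofList _ _).mpr hmem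
      have hc : (fun x => cs.contains x) x = true := List.contains_iff_mem.mpr hmem
      rw [List.filter_cons_of_pos hc, if_pos hmemS, List.length_cons]
      push_cast
      linarith [ihl]
    · have hmemS : x ∉ PySem.Set.ofList cs := fun h => hmem ((PySem.Set.mem_ofList _ _).mp h)
      have hc : (fun x => cs.contains x) x = false := by
        by_contra h
        exact hmem (List.contains_iff_mem.mp (by simpa using h))
      have hc' : ¬ ((fun x => cs.contains x) x = true) := by simp only [hc]; exact Bool.false_ne_true
      rw [List.filter_cons_of_neg hc', if_neg hmemS, ihl]
      ring

theorem zip_take_len :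
    ∀ (cs gs : List Char), cs.length ≤ gs.length →
      cs.zip (gs.take cs.length) = cs.zip gs := by
  intro cs
  induction cs with
  | nil => intro gs _; simp
  | cons c cs' ih =>
    intro gs hle
    cases gs with
    | nil => simp at hle
    | cons g gs' =>
      have hm : cs'.length ≤ gs'.length := by simpa using hle
      simp [List.take_succ_cons, List.zip_cons_cons, ih gs' hm]

-- ===== VERDICT =====
theorem nearhit_spec : Claim_equal_nearhit := by
  intro code guess _ hpre
  unfold Spec_nearhit nearhit nearhit_alt
  dsimp only
  set cs := code.toList with hcs
  set gs := guess.toList with hgs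
  have hlen : cs.length ≤ gs.length := hpre
  -- A's fold as two pyRange filters
  have h : ∀ i ∈ PySem.List.pyRange 0 cs.length 1,
      ((PySem.List.pyGet? gs i).getD ' ' == (PySem.List.pyGet? cs i).getD ' ') = true →
      (cs.contains ((PySem.List.pyGet? gs i).getD ' ')) = true := by
    intro i hi heq
    have hmem := (PySem.List.mem_pyRange_one).1 hi
    have h0 : 0 ≤ i := hmem.1
    have h1 : i < (cs.length : Int) := hmem.2
    have hlt : i.toNat < cs.length := by omega
    have hget : PySem.List.pyGet? cs i = some cs[i.toNat] := by
      simp [PySem.List.pyGet?, PySem.List.pyIdx?, h0, h1]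
    have hg : (PySem.List.pyGet? gs i).getD ' ' = cs[i.toNat] := by
      have := beq_iff_eq.mp heq
      rw [this, hget]; rfl
    rw [hg]
    exact List.contains_iff_mem.mpr (List.getElem_mem hlt)
  have key := nearhit_fold_split
    (fun i => cs.contains ((PySem.List.pyGet? gs i).getD ' '))
    (fun i => (PySem.List.pyGet? gs i).getD ' ' == (PySem.List.pyGet? cs i).getD ' ')
    (PySem.List.pyRange 0 cs.length 1) h 0
  simp only [zero_add] at key
  -- pyRange filters as List.range filters over getD
  have hrange : PySem.List.pyRange 0 (cs.length : Int) 1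
      = (List.range cs.length).map (fun k => ((k : Nat) : Int)) := by
    rw [PySem.List.pyRange_one]; simp
  have hgetg : ∀ k : Nat, k < gs.length →
      (PySem.List.pyGet? gs ((k : Nat) : Int)).getD ' ' = gs.getD k ' ' := by
    intro k _
    rw [PySem.List.pyGet?_natCast]
    simp [List.getD]
  have hgetc : ∀ k : Nat, k < cs.length →
      (PySem.List.pyGet? cs ((k : Nat) : Int)).getD ' ' = cs.getD k ' ' := by
    intro k _
    rw [PySem.List.pyGet?_natCast]
    simp [List.getD]
  have hfin : ((PySem.List.pyRange 0 cs.length 1).filter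
        (fun i => cs.contains ((PySem.List.pyGet? gs i).getD ' '))).length
      = ((List.range cs.length).filter (fun k => cs.contains (gs.getD k ' '))).length := by
    rw [hrange, List.filter_map, List.length_map]
    congr 1
    apply List.filter_congr
    intro k hk
    have hklt : k < cs.length := List.mem_range.mp hk
    simp only [Function.comp]
    rw [hgetg k (lt_of_lt_of_le hklt hlen)]
  have hfeq : ((PySem.List.pyRange 0 cs.length 1).filter
        (fun i => (PySem.List.pyGet? gs i).getD ' ' == (PySem.List.pyGet? cs i).getD ' ')).length
      = ((List.range cs.length).filter
        (fun k => gs.getD k ' ' == cs.getD k ' ')).length := by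
    rw [hrange, List.filter_map, List.length_map]
    congr 1
    apply List.filter_congr
    intro k hk
    have hklt : k < cs.length := List.mem_range.mp hk
    simp only [Function.comp]
    rw [hgetg k (lt_of_lt_of_le hklt hlen), hgetc k hklt]
  rw [hfin, hfeq] at key
  -- B's three pieces
  have hpre' : PySem.List.slice gs none (some (cs.length : Int)) = gs.take cs.length :=
    PySem.List.slice_to_natCast gs cs.length
  have hzip : cs.zip (gs.take cs.length) = cs.zip gs := zip_take_len cs gs hlen
  rw [filter_range_getD (fun x => cs.contains x) cs.length gs hlen] at key
  rw [filter_mem_eq_sum_counts cs (gs.take cs.length)] at key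
  rw [filter_range_eq_zip cs gs hlen] at key
  rw [← hzip, ← hpre'] at key
  simpa [ne_eq, beq_iff_eq] using key
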